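-- pv_equiv track=rewrite | github.com/Boosya/Hackerrank | Algorithms/Strings/sherlock_and_valid_string.py | check_for_validity
-- ===== SOURCE A (Python) =====
-- from collections import defaultdict
--
-- def check_for_validity(string):
--     # dict will store all letters we see and how many times we saw them
--     letters = defaultdict(int)
--     for letter in string:
--         letters[letter] += 1
--     # nb_letters is a dic with key = nb of times we saw a letter and value the amount of such letters
--     nb_letters = defaultdict(int)
--     for nb_letter in letters.values():
--         nb_letters[nb_letter] += 1
--     # if more than 2 distinct occurences of letters, not valid string
--     if len(nb_letters) > 2:
--         return 'NO'
--     # if 1 distunct occurence or empty string, return YES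
--     if len(nb_letters) < 2:
--         return 'YES'
--     # if 2 distunct occurences and the smallest occurence is just 1, return YES
--     if len(nb_letters) == 2 and min(nb_letters.values()) == 1:
--         return 'YES'
--     return 'NO'
-- ===== SOURCE B (Python) =====
-- from collections import Counter
--
-- def check_for_validity(string):
--     # Brute-force deletion test: the string is valid (in A's sense) iff all letter
--     # frequencies are already equal, or deleting ALL occurrences of one single
--     # letter makes every remaining letter's frequency equal.
--     freqs = list(Counter(string).values())
--     if len(set(freqs)) <= 1:
--         return 'YES'
--     for i in range(len(freqs)):
--         rest = freqs[:i] + freqs[i + 1:]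
--         if len(set(rest)) == 1:
--             return 'YES'
--     return 'NO'
-- ===== Notes on version B (the rewrite author's own statement) =====
-- stated objective: alternative
-- what changed: Replaces A's frequency-of-frequencies dictionary inspection with a brute-force deletion test: B answers YES iff the letter frequencies are already all equal or removing one letter's whole frequency entry leaves the rest all equal, scanning candidate deletions directly.
import Mathlib
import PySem

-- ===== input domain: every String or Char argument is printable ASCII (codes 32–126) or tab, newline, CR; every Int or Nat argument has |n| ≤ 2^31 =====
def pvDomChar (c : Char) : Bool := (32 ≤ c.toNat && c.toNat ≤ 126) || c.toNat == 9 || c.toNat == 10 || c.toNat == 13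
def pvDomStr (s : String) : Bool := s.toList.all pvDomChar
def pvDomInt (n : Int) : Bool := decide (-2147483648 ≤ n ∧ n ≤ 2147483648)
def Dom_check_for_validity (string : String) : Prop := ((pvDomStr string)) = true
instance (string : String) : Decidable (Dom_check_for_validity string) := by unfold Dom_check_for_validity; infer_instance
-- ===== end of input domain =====

-- B replaces A's frequency-of-frequencies dictionary with a brute-force deletion test over the
-- frequency list (all equal already, or dropping one entry leaves the rest all equal); alternative algorithm, same behaviour.

-- ===== PORT A =====
def check_for_validity (string : String) : String :=
  -- letters = defaultdict(int); for letter in string: letters[letter] += 1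
  let letters : PySem.Dict Char Int :=
    string.toList.foldl (fun d c => d.modify c 0 (· + 1)) PySem.Dict.empty
  -- nb_letters = defaultdict(int); for nb_letter in letters.values(): nb_letters[nb_letter] += 1
  let nb_letters : PySem.Dict Int Int :=
    letters.values.foldl (fun d v => d.modify v 0 (· + 1)) PySem.Dict.empty
  if nb_letters.size > 2 then "NO"
  else if nb_letters.size < 2 then "YES"
  else if nb_letters.size = 2 ∧ PySem.List.min? nb_letters.values (fun x => x) = some 1 then "YES"
  else "NO"

-- ===== PORT B =====
def check_for_validity_alt (string : String) : String :=
  -- freqs = list(Counter(string).values())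
  let freqs : List Int := (PySem.Dict.counter string.toList).values
  -- if len(set(freqs)) <= 1: return 'YES'
  if (PySem.Set.ofList freqs).length ≤ 1 then "YES"
  -- for i in range(len(freqs)): if len(set(freqs[:i] + freqs[i+1:])) == 1: return 'YES'
  else if (PySem.List.pyRange 0 (freqs.length : Int) 1).any (fun i =>
      (PySem.Set.ofList
        (PySem.List.slice freqs none (some i) ++ PySem.List.slice freqs (some (i + 1)) none)).length == 1)
    then "YES"
  else "NO"

-- ===== PRECONDITION & SPEC =====
def Spec_check_for_validity (string : String) (out : String) : Prop := out = check_for_validity_alt string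
instance (string : String) (out : String) : Decidable (Spec_check_for_validity string out) := by unfold Spec_check_for_validity; infer_instance

-- ===== CLAIM (what is proved, stated in full; the proofs are below) =====
def Claim_equal_check_for_validity : Prop := ∀ (string : String), Dom_check_for_validity string → Spec_check_for_validity string (check_for_validity string)

-- ===== LEMMAS AND PROOFS =====

-- A's tail after the first counting loop, as a function of the frequency list
def pvTailA (vals : List Int) : String :=
  if (PySem.Dict.counter vals).size > 2 then "NO"
  else if (PySem.Dict.counter vals).size < 2 then "YES"
  else if (PySem.Dict.counter vals).size = 2 ∧
      PySem.List.min? (PySem.Dict.counter vals).values (fun x => x) = some 1 then "YES"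
  else "NO"

-- B's tail after the counting, as a function of the frequency list
def pvTailB (vals : List Int) : String :=
  if (PySem.Set.ofList vals).length ≤ 1 then "YES"
  else if (PySem.List.pyRange 0 (vals.length : Int) 1).any (fun i =>
      (PySem.Set.ofList
        (PySem.List.slice vals none (some i) ++ PySem.List.slice vals (some (i + 1)) none)).length == 1)
    then "YES"
  else "NO"

-- B's loop condition, rephrased: some index removal leaves a one-element value set
def pvBany (vals : List Int) : Prop :=
  ∃ k : Nat, k < vals.length ∧
    (PySem.Set.ofList (vals.take k ++ vals.drop (k + 1))).length = 1

lemma pvMin2 (cx cy : Nat) (h1 : 0 < cx) (h2 : 0 < cy) :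
    (min ((cx : Int)) ((cy : Int)) = 1 ↔ cx = 1 ∨ cy = 1) := by
  rcases le_total ((cx : Int)) ((cy : Int)) with h | h <;>
    simp [h] <;> omega

-- a nodup list whose elements are all equal has length ≤ 1
lemma pvNodupConst {l : List Int} {b : Int} (hnd : l.Nodup) (hall : ∀ x ∈ l, x = b) :
    l.length ≤ 1 := by
  cases l with
  | nil => simp
  | cons x t =>
    have hx : x = b := hall x (by simp)
    have ht : t = [] := by
      apply List.eq_nil_iff_forall_not_mem.mpr
      intro y hy
      have : y = b := hall y (by simp [hy])
      have : y = x := by rw [this, hx]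
      subst this
      exact (List.nodup_cons.mp hnd).1 hy
    simp [ht]

-- one-element value set ↔ nonempty and all elements equal
lemma pvSetOne (l : List Int) :
    (PySem.Set.ofList l).length = 1 ↔ ∃ b, b ∈ l ∧ ∀ x ∈ l, x = b := by
  constructor
  · intro h
    obtain ⟨b, hb⟩ := List.length_eq_one_iff.mp h
    refine ⟨b, ?_, ?_⟩
    · have : b ∈ PySem.Set.ofList l := by simp [hb]
      exact (PySem.Set.mem_ofList _ _).mp this
    · intro x hx
      have : x ∈ PySem.Set.ofList l := (PySem.Set.mem_ofList _ _).mpr hx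
      simpa [hb] using this
  · rintro ⟨b, hbl, hall⟩
    have hnd := PySem.Set.nodup_ofList (xs := l)
    have hall' : ∀ x ∈ PySem.Set.ofList l, x = b := by
      intro x hx
      exact hall x ((PySem.Set.mem_ofList _ _).mp hx)
    have hle := pvNodupConst hnd hall'
    have hpos : 0 < (PySem.Set.ofList l).length := by
      have : b ∈ PySem.Set.ofList l := (PySem.Set.mem_ofList _ _).mpr hbl
      exact List.length_pos_of_mem this
    omega

-- decomposition of vals around index k
lemma pvSplit (vals : List Int) (k : Nat) (hk : k < vals.length) :
    vals = vals.take k ++ vals[k] :: vals.drop (k + 1) := by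
  conv_lhs => rw [← List.take_append_drop k vals]
  rw [List.drop_eq_getElem_cons hk]

-- the deletion test succeeds iff exactly two distinct values and one of them occurs once
-- (assuming at least two distinct values)
lemma pvBany_iff (vals : List Int) (h2 : 2 ≤ (PySem.Set.ofList vals).length) :
    pvBany vals ↔ (PySem.Set.ofList vals).length = 2 ∧ ∃ a ∈ vals, vals.count a = 1 := by
  constructor
  · rintro ⟨k, hk, hone⟩
    obtain ⟨b, hbmem, ball⟩ := (pvSetOne _).mp hone
    set c := vals[k] with hc
    have hsplit := pvSplit vals k hk
    have hmem_rest : ∀ x ∈ vals, x = b ∨ x = c := by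
      intro x hx
      rw [hsplit] at hx
      rcases List.mem_append.mp hx with h | h
      · exact Or.inl (ball x (List.mem_append.mpr (Or.inl h)))
      · rcases List.mem_cons.mp h with h | h
        · exact Or.inr h
        · exact Or.inl (ball x (List.mem_append.mpr (Or.inr h)))
    have hbc : b ≠ c := by
      intro hbc
      have hall : ∀ x ∈ PySem.Set.ofList vals, x = b := by
        intro x hx
        rcases hmem_rest x ((PySem.Set.mem_ofList _ _).mp hx) with h | h
        · exact h
        · rw [h, ← hbc]
      have := pvNodupConst (PySem.Set.nodup_ofList (xs := vals)) hall
      omega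
    have hcount : vals.count c = 1 := by
      have hrest0 : (vals.take k ++ vals.drop (k + 1)).count c = 0 := by
        apply List.count_eq_zero.mpr
        intro hcmem
        exact hbc (ball c hcmem).symm
      have : vals.count c = (vals.take k).count c + ((vals[k] :: vals.drop (k + 1)).count c) := by
        conv_lhs => rw [hsplit]
        rw [List.count_append]
      rw [List.count_append] at hrest0
      rw [this, ← hc, List.count_cons_self]
      omega
    have hcmem : c ∈ vals := List.getElem_mem hk
    have hlen2 : (PySem.Set.ofList vals).length = 2 := by
      have hsub : ∀ x ∈ PySem.Set.ofList vals, x ∈ ([b, c] : List Int) := by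
        intro x hx
        rcases hmem_rest x ((PySem.Set.mem_ofList _ _).mp hx) with h | h <;> simp [h]
      have hle : (PySem.Set.ofList vals).length ≤ 2 := by
        have := (List.subperm_of_subset (PySem.Set.nodup_ofList (xs := vals)) hsub).length_le
        simpa using this
      omega
    exact ⟨hlen2, c, hcmem, hcount⟩
  · rintro ⟨hlen2, a, hamem, ha1⟩
    obtain ⟨k, hk, hak⟩ := List.mem_iff_getElem.mp hamem
    refine ⟨k, hk, (pvSetOne _).mpr ?_⟩
    have hsplit := pvSplit vals k hk
    -- all elements of the remainder differ from a
    have hrest_ne : ∀ x ∈ vals.take k ++ vals.drop (k + 1), x ≠ a := by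
      intro x hx hxa
      subst hxa
      have : vals.count x = (vals.take k ++ vals.drop (k + 1)).count x + 1 := by
        conv_lhs => rw [hsplit]
        rw [List.count_append, List.count_append, hak, List.count_cons_self]
        omega
      have hpos : 0 < (vals.take k ++ vals.drop (k + 1)).count x :=
        List.count_pos_iff.mpr hx
      omega
    -- there is a second distinct value b
    have : ∃ b ∈ vals, b ≠ a := by
      by_contra hno
      push Not at hno
      have hall : ∀ x ∈ PySem.Set.ofList vals, x = a := by
        intro x hx
        exact hno x ((PySem.Set.mem_ofList _ _).mp hx)
      have := pvNodupConst (PySem.Set.nodup_ofList (xs := vals)) hall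
      omega
    obtain ⟨b, hbmem, hba⟩ := this
    refine ⟨b, ?_, ?_⟩
    · -- b is in the remainder
      rw [hsplit] at hbmem
      rcases List.mem_append.mp hbmem with h | h
      · exact List.mem_append.mpr (Or.inl h)
      · rcases List.mem_cons.mp h with h | h
        · exact absurd (h.trans hak) hba
        · exact List.mem_append.mpr (Or.inr h)
    · -- every element of the remainder equals b
      intro x hx
      have hxvals : x ∈ vals := by
        rw [hsplit]
        rcases List.mem_append.mp hx with h | h
        · exact List.mem_append.mpr (Or.inl h)
        · exact List.mem_append.mpr (Or.inr (List.mem_cons.mpr (Or.inr h)))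
      -- x and b are both in the 2-element value set, and both differ from a
      have hset2 : ∀ y ∈ vals, y ≠ a → y = b := by
        intro y hy hya
        by_contra hyb
        have hsub : ∀ z ∈ ([a, b, y] : List Int), z ∈ PySem.Set.ofList vals := by
          intro z hz
          apply (PySem.Set.mem_ofList _ _).mpr
          rcases List.mem_cons.mp hz with h | hz <;> [skip ; rcases List.mem_cons.mp hz with h | hz]
          · exact h ▸ hamem
          · exact h ▸ hbmem
          · rw [List.mem_singleton.mp hz]; exact hy
        have hnd3 : ([a, b, y] : List Int).Nodup := by
          refine List.nodup_cons.mpr ⟨?_, List.nodup_cons.mpr ⟨?_, List.nodup_singleton _⟩⟩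
          · intro h
            rcases List.mem_cons.mp h with h | h
            · exact hba h.symm
            · exact hya (List.mem_singleton.mp h).symm
          · intro h
            exact hyb (List.mem_singleton.mp h).symm
        have := (List.subperm_of_subset hnd3 hsub).length_le
        simp at this
        omega
      exact hset2 x hxvals (hrest_ne x hx)

lemma pvTail_eq (vals : List Int) : pvTailA vals = pvTailB vals := by
  unfold pvTailA pvTailB
  have hsize : (PySem.Dict.counter vals).size = (PySem.Set.ofList vals).length := by
    simp [PySem.Dict.size, PySem.Dict.items_counter]
  have hvalues : (PySem.Dict.counter vals).values
      = (PySem.Set.ofList vals).map (fun k => ((vals.count k : Int))) := by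
    simp [PySem.Dict.values, PySem.Dict.items_counter]
  -- rewrite B's any over the range as pvBany
  have hany : ((PySem.List.pyRange 0 (vals.length : Int) 1).any (fun i =>
      (PySem.Set.ofList
        (PySem.List.slice vals none (some i) ++ PySem.List.slice vals (some (i + 1)) none)).length == 1)
      = true) ↔ pvBany vals := by
    rw [List.any_eq_true]
    constructor
    · rintro ⟨i, hi, hcond⟩
      have hi' := (PySem.List.mem_pyRange_one).mp hi
      have h0 : 0 ≤ i := hi'.1
      refine ⟨i.toNat, by omega, ?_⟩
      rw [PySem.List.slice_to _ h0, PySem.List.slice_from _ (by omega)] at hcond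
      have : (i + 1).toNat = i.toNat + 1 := by omega
      rw [this] at hcond
      exact Nat.beq_eq_true_eq _ _ ▸ (by simpa using hcond)
    · rintro ⟨k, hk, hone⟩
      refine ⟨(k : Int), PySem.List.mem_pyRange_one.mpr (by omega), ?_⟩
      rw [PySem.List.slice_to _ (by omega), PySem.List.slice_from _ (by omega)]
      have h1 : ((k : Int)).toNat = k := by omega
      have h2 : ((k : Int) + 1).toNat = k + 1 := by omega
      rw [h1, h2]
      simpa using hone
  rw [hsize]
  by_cases hle : (PySem.Set.ofList vals).length ≤ 1
  · -- both YES
    have hng : ¬ (PySem.Set.ofList vals).length > 2 := by omega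
    have h2 : (PySem.Set.ofList vals).length < 2 := by omega
    rw [if_neg hng, if_pos h2, if_pos hle]
  · have hge2 : 2 ≤ (PySem.Set.ofList vals).length := by omega
    have hBiff := pvBany_iff vals hge2
    by_cases hgt : (PySem.Set.ofList vals).length > 2
    · -- A: NO. B: the loop cannot succeed when ≥ 3 distinct values
      have hnot : ¬ pvBany vals := fun h => by have := (hBiff.mp h).1; omega
      rw [if_pos hgt, if_neg hle, if_neg (fun h => hnot (hany.mp h))]
    · -- exactly 2 distinct values
      have h2eq : (PySem.Set.ofList vals).length = 2 := by omega
      obtain ⟨x, y, hxy⟩ := List.length_eq_two.mp h2eq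
      have hnd : ([x, y] : List Int).Nodup := hxy ▸ PySem.Set.nodup_ofList (xs := vals)
      have hxne : x ≠ y := by simpa using hnd
      have hxv : x ∈ vals := (PySem.Set.mem_ofList _ _).mp (by rw [hxy]; simp)
      have hyv : y ∈ vals := (PySem.Set.mem_ofList _ _).mp (by rw [hxy]; simp)
      have hxc : 0 < vals.count x := List.count_pos_iff.mpr hxv
      have hyc : 0 < vals.count y := List.count_pos_iff.mpr hyv
      have hmin : PySem.List.min? ((PySem.Dict.counter vals).values) (fun x => x)
          = some (min ((vals.count x : Int)) ((vals.count y : Int))) := by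
        rw [hvalues, hxy]
        simp [PySem.List.min?_id_cons]
      have hminiff : (PySem.List.min? ((PySem.Dict.counter vals).values) (fun x => x) = some 1)
          ↔ (∃ a ∈ vals, vals.count a = 1) := by
        rw [hmin]
        constructor
        · intro h
          have := (pvMin2 _ _ hxc hyc).mp (by exact_mod_cast Option.some_injective _ h)
          rcases this with h1 | h1
          · exact ⟨x, hxv, h1⟩
          · exact ⟨y, hyv, h1⟩
        · rintro ⟨a, hav, ha1⟩
          have haS : a ∈ ([x, y] : List Int) := hxy ▸ (PySem.Set.mem_ofList _ _).mpr hav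
          have : vals.count x = 1 ∨ vals.count y = 1 := by
            rcases List.mem_cons.mp haS with h | h
            · exact Or.inl (h ▸ ha1)
            · exact Or.inr ((List.mem_singleton.mp h) ▸ ha1)
          rw [(pvMin2 _ _ hxc hyc).mpr this]
      rw [if_neg hgt, if_neg (by omega : ¬ (PySem.Set.ofList vals).length < 2), if_neg hle]
      by_cases hB : pvBany vals
      · rw [if_pos (hany.mpr hB), if_pos ⟨h2eq, hminiff.mpr (hBiff.mp hB).2⟩]
      · rw [if_neg (fun h => hB (hany.mp h)),
            if_neg (fun h => hB (hBiff.mpr ⟨h2eq, hminiff.mp h.2⟩))]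

theorem pv_main (string : String) :
    check_for_validity string = check_for_validity_alt string := by
  have hA : check_for_validity string = pvTailA ((PySem.Dict.counter string.toList).values) := rfl
  have hB : check_for_validity_alt string = pvTailB ((PySem.Dict.counter string.toList).values) := rfl
  rw [hA, hB, pvTail_eq]

-- ===== VERDICT (by name: the statement is the Claim_ definition above) =====
theorem check_for_validity_spec : Claim_equal_check_for_validity := by
  intro s _
  unfold Spec_check_for_validity
  exact pv_main s
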